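-- pv_equiv track=rewrite | github.com/Axgrav05/Obscura | ml/external_ner_datasets.py | _map_io_sequence
-- ===== SOURCE A (Python) =====
-- from typing import Any, Iterable
--
-- def _normalize_label_name(label_name: str, mapping: dict[str, str]) -> str:
--     return mapping.get(label_name, "O")
--
-- def _map_io_sequence(label_names: list[str], raw_ids: Iterable[int], mapping: dict[str, str]) -> list[str]:
--     mapped: list[str] = []
--     previous_type: str | None = None
--     for raw_id in raw_ids:
--         raw_label = label_names[int(raw_id)]
--         if raw_label == "O":
--             mapped.append("O")
--             previous_type = None
--             continue
--
--         mapped_base = _normalize_label_name(raw_label, mapping)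
--         if mapped_base == "O":
--             mapped.append("O")
--             previous_type = None
--             continue
--
--         entity_type = mapped_base.split("-", 1)[1]
--         prefix = "I" if previous_type == entity_type else "B"
--         mapped.append(f"{prefix}-{entity_type}")
--         previous_type = entity_type
--     return mapped
-- ===== SOURCE B (Python) =====
-- def _map_io_sequence(label_names, raw_ids, mapping):
--     types = []
--     for raw_id in raw_ids:
--         raw_label = label_names[int(raw_id)]
--         if raw_label == "O":
--             types.append(None)
--         else:
--             base = mapping.get(raw_label, "O")
--             types.append(None if base == "O" else base.split("-", 1)[1])
--     return [
--         "O" if cur is None else f"{'I' if cur == prev else 'B'}-{cur}"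
--         for prev, cur in zip([None] + types[:-1], types)
--     ]
-- ===== Notes on version B (the rewrite author's own statement) =====
-- stated objective: alternative
-- what changed: Replaces the single stateful loop with a running previous_type accumulator by two passes: first map every id to its entity type (or None for 'O'), then emit BIO tags by zipping each type with its shifted predecessor.
import Mathlib
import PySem

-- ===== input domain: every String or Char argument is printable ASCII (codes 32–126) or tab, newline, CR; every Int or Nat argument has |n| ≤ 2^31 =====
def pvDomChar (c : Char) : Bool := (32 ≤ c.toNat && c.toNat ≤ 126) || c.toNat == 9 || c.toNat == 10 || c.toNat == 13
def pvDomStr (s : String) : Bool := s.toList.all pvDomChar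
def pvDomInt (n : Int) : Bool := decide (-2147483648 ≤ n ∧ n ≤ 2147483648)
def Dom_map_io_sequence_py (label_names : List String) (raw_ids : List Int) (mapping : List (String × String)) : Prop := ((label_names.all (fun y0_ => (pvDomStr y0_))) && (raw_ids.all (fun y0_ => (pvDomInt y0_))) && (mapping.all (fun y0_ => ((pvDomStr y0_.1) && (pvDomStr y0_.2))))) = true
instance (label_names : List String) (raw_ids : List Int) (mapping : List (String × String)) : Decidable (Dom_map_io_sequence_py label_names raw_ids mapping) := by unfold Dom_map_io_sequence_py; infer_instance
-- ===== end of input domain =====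

-- B replaces A's stateful single loop (running previous_type) by two passes: map each id to
-- its entity-type option, then zip each type with its shifted predecessor to emit BIO tags.

-- ===== PORT A =====
-- mapping.get(label_name, "O")  (helper _normalize_label_name)
def pvNormalize (label_name : String) (mapping : List (String × String)) : String :=
  (PySem.Dict.ofList mapping).getD label_name "O"

-- literal port of A's loop: state = (mapped, previous_type); pyGetD is exact under Pre_
def map_io_sequence_py (label_names : List String) (raw_ids : List Int) (mapping : List (String × String)) : List String :=
  (raw_ids.foldl (fun (st : List String × Option String) raw_id =>
      let raw_label := PySem.List.pyGetD label_names raw_id ""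
      if raw_label = "O" then (st.1 ++ ["O"], none)
      else
        let mapped_base := pvNormalize raw_label mapping
        if mapped_base = "O" then (st.1 ++ ["O"], none)
        else
          let entity_type := PySem.List.pyGetD ((PySem.Str.splitMax? mapped_base "-" 1).getD []) 1 ""
          let pre := if st.2 = some entity_type then "I" else "B"
          (st.1 ++ [pre ++ "-" ++ entity_type], some entity_type))
    ([], none)).1

-- ===== PORT B =====
-- first pass: the entity type of one position, none for 'O'
def pvTypeOf (label_names : List String) (mapping : List (String × String)) (raw_id : Int) : Option String :=
  let raw_label := PySem.List.pyGetD label_names raw_id ""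
  if raw_label = "O" then none
  else
    let base := (PySem.Dict.ofList mapping).getD raw_label "O"
    if base = "O" then none
    else some (PySem.List.pyGetD ((PySem.Str.splitMax? base "-" 1).getD []) 1 "")

-- second pass: emit from (prev, cur)
def pvEmit (pc : Option String × Option String) : String :=
  match pc.2 with
  | none => "O"
  | some cur => (if pc.1 = some cur then "I" else "B") ++ "-" ++ cur

def map_io_sequence_py_alt (label_names : List String) (raw_ids : List Int) (mapping : List (String × String)) : List String :=
  let types := raw_ids.map (pvTypeOf label_names mapping)
  (List.zip (none :: PySem.List.slice types none (some (-1))) types).map pvEmit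

-- ===== PRECONDITION & SPEC =====
-- Pre_ excludes exactly the inputs on which Python A raises: an id out of range (IndexError on
-- label_names[id]) or a non-'O' label mapped to a dash-free non-'O' value (IndexError on split("-",1)[1]).
def Pre_map_io_sequence_py (label_names : List String) (raw_ids : List Int) (mapping : List (String × String)) : Prop :=
  ∀ raw_id ∈ raw_ids, PySem.Raise.InRange label_names.length raw_id ∧
    (PySem.List.pyGetD label_names raw_id "" ≠ "O" →
      (PySem.Dict.ofList mapping).getD (PySem.List.pyGetD label_names raw_id "") "O" ≠ "O" →
      PySem.Str.isIn "-" ((PySem.Dict.ofList mapping).getD (PySem.List.pyGetD label_names raw_id "") "O") = true)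
instance (label_names : List String) (raw_ids : List Int) (mapping : List (String × String)) : Decidable (Pre_map_io_sequence_py label_names raw_ids mapping) := by unfold Pre_map_io_sequence_py; infer_instance

def pvWitness_map_io_sequence_py : List String × List Int × (List (String × String)) :=
  (["O", "B-PER", "I-PER"], [1, 2, 0, 1], [("B-PER", "B-PER"), ("I-PER", "I-PER")])

def Spec_map_io_sequence_py (label_names : List String) (raw_ids : List Int) (mapping : List (String × String)) (out : List String) : Prop := out = map_io_sequence_py_alt label_names raw_ids mapping
instance (label_names : List String) (raw_ids : List Int) (mapping : List (String × String)) (out : List String) : Decidable (Spec_map_io_sequence_py label_names raw_ids mapping out) := by unfold Spec_map_io_sequence_py; infer_instance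

-- ===== CLAIM (what is proved, stated in full; the proofs are below) =====
def Claim_equal_map_io_sequence_py : Prop := ∀ (label_names : List String) (raw_ids : List Int) (mapping : List (String × String)), Dom_map_io_sequence_py label_names raw_ids mapping → Pre_map_io_sequence_py label_names raw_ids mapping → Spec_map_io_sequence_py label_names raw_ids mapping (map_io_sequence_py label_names raw_ids mapping)

-- ===== LEMMAS AND PROOFS =====

-- A's loop body is pvEmit/pvTypeOf in disguise
lemma pv_step_eq (label_names : List String) (mapping : List (String × String))
    (acc : List String) (prev : Option String) (raw_id : Int) :
    (let raw_label := PySem.List.pyGetD label_names raw_id ""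
     if raw_label = "O" then (acc ++ ["O"], (none : Option String))
     else
       let mapped_base := pvNormalize raw_label mapping
       if mapped_base = "O" then (acc ++ ["O"], none)
       else
         let entity_type := PySem.List.pyGetD ((PySem.Str.splitMax? mapped_base "-" 1).getD []) 1 ""
         let pre := if prev = some entity_type then "I" else "B"
         (acc ++ [pre ++ "-" ++ entity_type], some entity_type))
    = (acc ++ [pvEmit (prev, pvTypeOf label_names mapping raw_id)], pvTypeOf label_names mapping raw_id) := by
  simp only [pvNormalize, pvTypeOf, pvEmit]
  split_ifs <;> simp_all

-- zip with shifted self: peel one element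
lemma pv_zip_shift {α : Type} (p t : Option α) (l : List (Option α)) :
    List.zip (p :: (t :: l).dropLast) (t :: l)
      = (p, t) :: List.zip (t :: l.dropLast) l := by
  cases l <;> simp [List.zip]

-- main loop invariant
lemma pv_loop_eq (label_names : List String) (mapping : List (String × String)) :
    ∀ (ids : List Int) (acc : List String) (prev : Option String),
    (ids.foldl (fun (st : List String × Option String) raw_id =>
        let raw_label := PySem.List.pyGetD label_names raw_id ""
        if raw_label = "O" then (st.1 ++ ["O"], none)
        else
          let mapped_base := pvNormalize raw_label mapping
          if mapped_base = "O" then (st.1 ++ ["O"], none)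
          else
            let entity_type := PySem.List.pyGetD ((PySem.Str.splitMax? mapped_base "-" 1).getD []) 1 ""
            let pre := if st.2 = some entity_type then "I" else "B"
            (st.1 ++ [pre ++ "-" ++ entity_type], some entity_type))
      (acc, prev)).1
    = acc ++ (List.zip (prev :: (ids.map (pvTypeOf label_names mapping)).dropLast)
                       (ids.map (pvTypeOf label_names mapping))).map pvEmit := by
  intro ids
  induction ids with
  | nil => intro acc prev; simp
  | cons id rest ih =>
    intro acc prev
    rw [List.foldl_cons, pv_step_eq label_names mapping acc prev id]
    rw [ih]
    rw [List.map_cons, pv_zip_shift prev (pvTypeOf label_names mapping id) (rest.map (pvTypeOf label_names mapping))]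
    simp

-- ===== VERDICT (by name: the statement is the Claim_ definition above) =====
theorem map_io_sequence_py_spec : Claim_equal_map_io_sequence_py := by
  intro label_names raw_ids mapping _ _
  unfold Spec_map_io_sequence_py map_io_sequence_py map_io_sequence_py_alt
  simp only [PySem.List.slice_to_neg_one]
  rw [pv_loop_eq]
  simp
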